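-- pv_equiv track=rewrite | github.com/clemencegoh/Python_Algorithms | algorithms/Daily_Interview/circle_of_chained_words.py | determine_if_all_chained
-- ===== SOURCE A (Python) =====
-- def determine_if_all_chained(arr: [str]) -> bool:
--     # first pass, throw all first into dict
--     firstWords = {}
--     for word in arr:
--         if word[0] not in firstWords:
--             firstWords[word[0]] = 0
--         firstWords[word[0]] += 1
--
--     # second pass, take away from dict
--     for word in arr:
--         if word[-1] not in firstWords:
--             return False
--         firstWords[word[-1]] -= 1
--
--     return all(value == 0 for value in firstWords.values())
-- ===== SOURCE B (Python) =====
-- def determine_if_all_chained(arr: [str]) -> bool: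
--     # multiset comparison: the first characters must be a rearrangement of the last characters
--     return sorted(w[0] for w in arr) == sorted(w[-1] for w in arr)
-- ===== Notes on version B (the rewrite author's own statement) =====
-- stated objective: idiomatic
-- what changed: Replaces the build-dict / early-return subtraction / all-zero scan with a single multiset comparison: sorted first characters == sorted last characters.
import Mathlib
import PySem

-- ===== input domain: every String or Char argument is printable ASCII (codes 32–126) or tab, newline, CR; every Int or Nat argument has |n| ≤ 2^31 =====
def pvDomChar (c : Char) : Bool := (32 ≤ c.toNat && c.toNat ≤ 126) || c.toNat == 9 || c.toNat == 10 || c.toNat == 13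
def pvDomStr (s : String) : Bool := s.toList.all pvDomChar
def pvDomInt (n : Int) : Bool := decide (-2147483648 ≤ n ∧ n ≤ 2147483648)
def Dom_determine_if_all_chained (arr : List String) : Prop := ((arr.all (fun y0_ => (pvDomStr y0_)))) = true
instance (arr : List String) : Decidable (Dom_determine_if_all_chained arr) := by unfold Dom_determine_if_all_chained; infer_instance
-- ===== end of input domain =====

-- B replaces A's dict build / early-return subtraction / all-zero scan by one multiset
-- comparison (sorted first chars == sorted last chars); objective: idiomatic.

-- ===== PORT A =====
-- w[0] / w[-1]; the .getD ' ' default is never reached under Pre_ (all words nonempty)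
def chainFirst (w : String) : Char := (PySem.List.pyGet? w.toList (0 : Int)).getD ' '
def chainLast (w : String) : Char := (PySem.List.pyGet? w.toList (-1 : Int)).getD ' '

-- first pass: if word[0] not in firstWords: firstWords[word[0]] = 0; firstWords[word[0]] += 1
def chainPass1 (arr : List String) : PySem.Dict Char Int :=
  arr.foldl (fun d w =>
    let c := chainFirst w
    let d := if d.contains c then d else d.insert c 0
    d.insert c (d.getD c 0 + 1)) PySem.Dict.empty

-- second pass with Python's early `return False`
def chainPass2 : List String → PySem.Dict Char Int → Option (PySem.Dict Char Int)
  | [], d => some d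
  | w :: ws, d =>
    let c := chainLast w
    if d.contains c then chainPass2 ws (d.insert c (d.getD c 0 - 1)) else none

def determine_if_all_chained (arr : List String) : Bool :=
  match chainPass2 arr (chainPass1 arr) with
  | none => false
  | some d => d.values.all (fun v => v == 0)

-- ===== PORT B =====
def determine_if_all_chained_alt (arr : List String) : Bool :=
  PySem.List.sorted (arr.map chainFirst) (fun c => c) false
    == PySem.List.sorted (arr.map chainLast) (fun c => c) false

-- ===== PRECONDITION & SPEC =====
-- Pre_ excludes exactly the inputs containing an empty word, on which A raises IndexError (w[0]).
def Pre_determine_if_all_chained (arr : List String) : Prop := ∀ w ∈ arr, w ≠ ""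
instance (arr : List String) : Decidable (Pre_determine_if_all_chained arr) := by unfold Pre_determine_if_all_chained; infer_instance
def pvWitness_determine_if_all_chained : List String := ["ab", "bc", "ca"]
def Spec_determine_if_all_chained (arr : List String) (out : Bool) : Prop := out = determine_if_all_chained_alt arr
instance (arr : List String) (out : Bool) : Decidable (Spec_determine_if_all_chained arr out) := by unfold Spec_determine_if_all_chained; infer_instance

-- ===== CLAIM (what is proved, stated in full; the proofs are below) =====
def Claim_equal_determine_if_all_chained : Prop := ∀ (arr : List String), Dom_determine_if_all_chained arr → Pre_determine_if_all_chained arr → Spec_determine_if_all_chained arr (determine_if_all_chained arr)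


-- ===== LEMMAS AND PROOFS =====

-- one step of A's first loop = the Counter step
lemma chainStep_eq (d : PySem.Dict Char Int) (c : Char) :
    (let d' := if d.contains c then d else d.insert c 0
     d'.insert c (d'.getD c 0 + 1)) = d.insert c (d.getD c 0 + 1) := by
  by_cases h : d.contains c = true
  · simp [h]
  · simp only [Bool.not_eq_true] at h
    simp only [h, Bool.false_eq_true, if_false]
    rw [PySem.Dict.getD_insert_self, PySem.Dict.insert_insert_self,
        PySem.Dict.getD_of_not_contains d 0 h]

-- A's first pass is Counter(first chars)
lemma chainPass1_eq_counter (arr : List String) :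
    chainPass1 arr = PySem.Dict.counter (arr.map chainFirst) := by
  unfold chainPass1
  rw [← PySem.Dict.foldl_insert_getD_add_one_eq_counter, List.foldl_map]
  congr 1
  funext d w
  exact chainStep_eq d (chainFirst w)

-- inserting at an existing key does not change containment
lemma contains_insert_of_contains (d : PySem.Dict Char Int) (c x : Char) (v : Int)
    (hc : d.contains c = true) : (d.insert c v).contains x = d.contains x := by
  rw [PySem.Dict.contains_insert]
  by_cases hx : x = c
  · subst hx; simp [hc]
  · simp [hx]

-- the second loop: what `some` means
lemma chainPass2_some (ws : List String) (d d' : PySem.Dict Char Int)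
    (h : chainPass2 ws d = some d') :
    (∀ w ∈ ws, d.contains (chainLast w) = true) ∧
    (∀ c, d'.getD c 0 = d.getD c 0 - ((ws.map chainLast).count c : Int)) ∧
    d'.keys = d.keys := by
  induction ws generalizing d with
  | nil =>
    simp only [chainPass2, Option.some.injEq] at h
    subst h
    refine ⟨by simp, fun c => by simp, rfl⟩
  | cons w ws ih =>
    simp only [chainPass2] at h
    by_cases hc : d.contains (chainLast w) = true
    · rw [if_pos hc] at h
      obtain ⟨h1, h2, h3⟩ := ih _ h
      refine ⟨?_, ?_, ?_⟩
      · intro w' hw'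
        rcases List.mem_cons.mp hw' with rfl | hw'
        · exact hc
        · have := h1 w' hw'
          rwa [contains_insert_of_contains _ _ _ _ hc] at this
      · intro c
        have := h2 c
        rw [PySem.Dict.getD_insert] at this
        simp only [List.map_cons, List.count_cons]
        by_cases hce : c = chainLast w
        · rw [if_pos hce] at this
          subst hce
          simp only [beq_self_eq_true, if_true]
          push_cast
          omega
        · rw [if_neg hce] at this
          have hne : (chainLast w == c) = false := by
            simp [beq_eq_false_iff_ne]; exact fun e => hce e.symm
          simp only [hne, Bool.false_eq_true, if_false, add_zero]
          exact this
      · rw [h3, PySem.Dict.keys_insert_of_contains _ _ hc]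
    · simp only [Bool.not_eq_true] at hc
      rw [if_neg (by simp [hc])] at h
      exact absurd h (by simp)

-- the second loop: `none` means some last char is missing
lemma chainPass2_none (ws : List String) (d : PySem.Dict Char Int)
    (h : chainPass2 ws d = none) :
    ∃ w ∈ ws, d.contains (chainLast w) = false := by
  induction ws generalizing d with
  | nil => simp [chainPass2] at h
  | cons w ws ih =>
    simp only [chainPass2] at h
    by_cases hc : d.contains (chainLast w) = true
    · rw [if_pos hc] at h
      obtain ⟨w', hw', hcon⟩ := ih _ h
      exact ⟨w', List.mem_cons_of_mem _ hw',
        by rwa [contains_insert_of_contains _ _ _ _ hc] at hcon⟩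
    · exact ⟨w, List.mem_cons_self, by simpa using hc⟩

-- B = true iff firsts and lasts are a permutation of one another
lemma alt_true_iff (arr : List String) :
    determine_if_all_chained_alt arr = true ↔
      (arr.map chainFirst).Perm (arr.map chainLast) := by
  unfold determine_if_all_chained_alt
  rw [beq_iff_eq]
  exact PySem.List.sorted_id_eq_sorted_id_iff_perm _ _

-- ===== VERDICT (by name: the statement is the Claim_ definition above) =====
theorem determine_if_all_chained_spec : Claim_equal_determine_if_all_chained := by
  intro arr _ _
  unfold Spec_determine_if_all_chained
  rw [Bool.eq_iff_iff, alt_true_iff]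
  unfold determine_if_all_chained
  rw [chainPass1_eq_counter]
  set f := arr.map chainFirst with hf
  set l := arr.map chainLast with hl
  cases h2 : chainPass2 arr (PySem.Dict.counter f) with
  | none =>
    simp only [Bool.false_eq_true, false_iff]
    intro hperm
    obtain ⟨w, hw, hcon⟩ := chainPass2_none _ _ h2
    rw [PySem.Dict.contains_counter] at hcon
    have hmem : chainLast w ∉ f := by
      intro hmf
      rw [List.contains_eq_mem] at hcon
      simp [hmf] at hcon
    have hml : chainLast w ∈ l := List.mem_map_of_mem hw
    have := hperm.count_eq (chainLast w)
    rw [List.count_eq_zero_of_not_mem hmem] at this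
    exact absurd (List.count_pos_iff.mpr hml) (by omega)
  | some d' =>
    obtain ⟨h1, hgd, hkeys⟩ := chainPass2_some _ _ _ h2
    simp only [← hl] at hgd
    have hnd : d'.keys.Nodup := by rw [hkeys]; exact PySem.Dict.nodup_keys_counter f
    show (d'.values.all fun v => v == 0) = true ↔ f.Perm l
    rw [PySem.Dict.values_eq_map_keys d' hnd 0, List.all_map, List.all_eq_true]
    simp only [Function.comp]
    constructor
    · intro hall
      rw [List.perm_iff_count]
      intro c
      by_cases hcf : c ∈ f
      · have hck : c ∈ d'.keys := by
          rw [hkeys, PySem.Dict.keys_counter]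
          exact (PySem.Set.mem_ofList f c).mpr hcf
        have := hall c hck
        rw [beq_iff_eq, hgd c, PySem.Dict.getD_counter] at this
        omega
      · rw [List.count_eq_zero_of_not_mem hcf, List.count_eq_zero_of_not_mem]
        intro hcl
        obtain ⟨w, hw, hwc⟩ := List.mem_map.mp hcl
        have := h1 w hw
        rw [hwc, PySem.Dict.contains_counter, List.contains_eq_mem] at this
        simp at this
        exact hcf this
    · intro hperm c _
      rw [beq_iff_eq, hgd c, PySem.Dict.getD_counter, hperm.count_eq c]
      omega
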